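-- pv_equiv track=rewrite | github.com/doriav20/ML_digits_tensorflow | digits.py | get_y_start_end
-- ===== SOURCE A (Python) =====
-- def get_y_start_end(img):
--     start = -1
--     end = -1
--     for i in range(len(img)):
--         row = img[i]
--         if start == -1 and not is_full_white(row):
--             start = i
--         elif start != -1 and is_full_white(row):
--             end = i
--             break
--     return start, end
--
-- def is_full_white(line):
--     for j in range(len(line)):
--         if line[j] != 0:
--             return False
--     return True
-- ===== SOURCE B (Python) =====
-- def get_y_start_end(img):
--     # Materialize the per-row whiteness mask, then answer by index lookups on it.
--     white = [all(p == 0 for p in row) for row in img]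
--     if False not in white:
--         return -1, -1
--     start = white.index(False)
--     try:
--         end = white.index(True, start + 1)
--     except ValueError:
--         end = -1
--     return start, end
-- ===== Notes on version B (the rewrite author's own statement) =====
-- stated objective: alternative
-- what changed: Replaced A's single state-machine loop over row indices with a data-transformation pipeline: first materialize the full per-row whiteness mask as a boolean list (no early break), then read start and end off that mask by list.index lookups.
import Mathlib
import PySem

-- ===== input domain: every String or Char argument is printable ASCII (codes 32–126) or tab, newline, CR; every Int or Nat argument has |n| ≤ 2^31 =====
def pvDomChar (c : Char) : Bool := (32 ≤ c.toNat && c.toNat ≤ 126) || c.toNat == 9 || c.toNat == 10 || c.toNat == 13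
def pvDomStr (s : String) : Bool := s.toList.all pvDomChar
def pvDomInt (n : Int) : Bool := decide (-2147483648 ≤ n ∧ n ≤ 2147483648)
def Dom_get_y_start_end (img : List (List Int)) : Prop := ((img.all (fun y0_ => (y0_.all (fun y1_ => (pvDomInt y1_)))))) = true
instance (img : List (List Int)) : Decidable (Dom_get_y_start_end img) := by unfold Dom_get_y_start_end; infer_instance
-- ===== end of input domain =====

-- B replaces A's state-machine index loop with a data pipeline: materialize the per-row
-- whiteness mask as a boolean list, then read start/end off it by index lookups (alternative decomposition, same cost).

-- ===== PORT A =====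
-- is_full_white(line): scan, return False at the first pixel != 0
def pvWhiteA : List Int → Bool
  | [] => true
  | p :: rest => if p ≠ 0 then false else pvWhiteA rest

-- A's for-loop: state (i, start); end stays -1 unless the break fires
def pvLoopA : List (List Int) → Int → Int → Int × Int
  | [], _, start => (start, -1)
  | r :: rs, i, start =>
    if start = -1 ∧ ¬ (pvWhiteA r = true) then pvLoopA rs (i + 1) i
    else if start ≠ -1 ∧ pvWhiteA r = true then (start, i)
    else pvLoopA rs (i + 1) start

def get_y_start_end (img : List (List Int)) : Int × Int := pvLoopA img 0 (-1)

-- ===== PORT B =====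
-- white = [all(p == 0 for p in row) for row in img]
def pvMask (img : List (List Int)) : List Bool := img.map (fun row => row.all (fun p => p == 0))

-- list.index(v, j) = j + first index of v in the suffix from j (exact: Python's
-- list.index with a start argument; ValueError ↦ the none branch, end = -1)
def get_y_start_end_alt (img : List (List Int)) : Int × Int :=
  let white := pvMask img
  if false ∈ white then
    match PySem.List.index? white false with
    | some s =>
        match PySem.List.index? (white.drop (s + 1)) true with
        | some k => ((s : Int), (s : Int) + 1 + (k : Int))
        | none => ((s : Int), -1)
    | none => (-1, -1)
  else (-1, -1)

-- ===== PRECONDITION & SPEC =====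
def Spec_get_y_start_end (img : List (List Int)) (out : Int × Int) : Prop := out = get_y_start_end_alt img
instance (img : List (List Int)) (out : Int × Int) : Decidable (Spec_get_y_start_end img out) := by unfold Spec_get_y_start_end; infer_instance

-- ===== CLAIM =====
def Claim_equal_get_y_start_end : Prop := ∀ (img : List (List Int)), Dom_get_y_start_end img → Spec_get_y_start_end img (get_y_start_end img)

-- ===== LEMMAS AND PROOFS =====

theorem pvAll_eq_white (r : List Int) : r.all (fun p => p == 0) = pvWhiteA r := by
  induction r with
  | nil => simp [pvWhiteA]
  | cons p rest ih =>
    by_cases h : p = 0 <;> simp [pvWhiteA, h, ih]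

theorem pvMask_cons (r : List Int) (rs : List (List Int)) :
    pvMask (r :: rs) = pvWhiteA r :: pvMask rs := by
  simp [pvMask, pvAll_eq_white]

-- phase 2 of A's loop (start already found) = first `true` in the mask of the rest
theorem pvLoopA_phase2 (rs : List (List Int)) : ∀ (i start : Int), start ≠ -1 →
    pvLoopA rs i start =
      (start, match PySem.List.index? (pvMask rs) true with
              | some k => i + (k : Int)
              | none => -1) := by
  induction rs with
  | nil => intro i start _; simp [pvLoopA, pvMask, PySem.List.index?]
  | cons r rest ih =>
    intro i start hs
    rw [pvMask_cons]
    by_cases hw : pvWhiteA r = true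
    · rw [hw, PySem.List.index?_cons_self]
      simp [pvLoopA, hs, hw]
    · have hne : pvWhiteA r ≠ true := hw
      rw [PySem.List.index?_cons_of_ne _ hne]
      have hstep : pvLoopA (r :: rest) i start = pvLoopA rest (i + 1) start := by
        simp [pvLoopA, hs, hw]
      rw [hstep, ih (i + 1) start hs]
      cases PySem.List.index? (pvMask rest) true with
      | none => simp
      | some k => simp [Option.map]; ring

-- phase 1 of A's loop = B's mask lookups, over a general nonnegative start index
theorem pvLoopA_phase1 (rs : List (List Int)) : ∀ (i : Int), 0 ≤ i →
    pvLoopA rs i (-1) =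
      (match PySem.List.index? (pvMask rs) false with
       | none => ((-1 : Int), (-1 : Int))
       | some s =>
           ((i + (s : Int)),
            match PySem.List.index? ((pvMask rs).drop (s + 1)) true with
            | some k => i + (s : Int) + 1 + (k : Int)
            | none => -1)) := by
  induction rs with
  | nil => intro i _; simp [pvLoopA, pvMask, PySem.List.index?]
  | cons r rest ih =>
    intro i hi
    rw [pvMask_cons]
    by_cases hw : pvWhiteA r = true
    · -- white head: A skips it; mask head is `true` ≠ `false`
      have hne : pvWhiteA r ≠ false := by simp [hw]
      rw [PySem.List.index?_cons_of_ne _ hne]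
      have hstep : pvLoopA (r :: rest) i (-1) = pvLoopA rest (i + 1) (-1) := by
        simp [pvLoopA, hw]
      rw [hstep, ih (i + 1) (by omega)]
      cases PySem.List.index? (pvMask rest) false with
      | none => simp
      | some s =>
        simp only [Option.map, List.drop_succ_cons]
        cases PySem.List.index? ((pvMask rest).drop (s + 1)) true with
        | none => simp; ring
        | some k => simp; omega
    · -- non-white head at index i: mask head is `false`
      have hw' : pvWhiteA r = false := by simpa using hw
      rw [hw', PySem.List.index?_cons_self]
      have hne : i ≠ -1 := by omega
      have hstep : pvLoopA (r :: rest) i (-1) = pvLoopA rest (i + 1) i := by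
        simp [pvLoopA, hw]
      rw [hstep, pvLoopA_phase2 rest (i + 1) i hne]
      cases h2 : PySem.List.index? (pvMask rest) true with
      | none =>
        rw [PySem.List.index?_eq_idxOf?] at h2
        simp [h2]
      | some k =>
        rw [PySem.List.index?_eq_idxOf?] at h2
        simp [h2]

-- ===== VERDICT =====
theorem get_y_start_end_spec : Claim_equal_get_y_start_end := by
  intro img _
  unfold Spec_get_y_start_end get_y_start_end get_y_start_end_alt
  rw [pvLoopA_phase1 img 0 (by omega)]
  by_cases hmem : false ∈ pvMask img
  · have hsome : (PySem.List.index? (pvMask img) false).isSome := by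
      rw [PySem.List.index?_isSome_iff]; exact hmem
    cases h : PySem.List.index? (pvMask img) false with
    | none => rw [h] at hsome; simp at hsome
    | some s =>
      simp only [hmem, if_true, h]
      cases PySem.List.index? ((pvMask img).drop (s + 1)) true with
      | none => simp
      | some k => simp
  · have hnone : PySem.List.index? (pvMask img) false = none := by
      rw [PySem.List.index?_eq_none_iff]; exact hmem
    rw [hnone]
    simp [hmem]
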